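-- pv_equiv track=rewrite | github.com/patrick3399/Jyzrox | backend/worker/tag_helpers.py | parse_tag_strings
-- ===== SOURCE A (Python) =====
-- def parse_tag_strings(tags: list[str]) -> list[tuple[str, str]]:
--     """Parse 'namespace:name' strings into deduplicated (namespace, name) tuples.
--
--     Bare names without ':' default to namespace='general'.
--     """
--     seen: set[tuple[str, str]] = set()
--     result: list[tuple[str, str]] = []
--     for tag_str in tags:
--         if ":" in tag_str:
--             ns, name = tag_str.split(":", 1)
--         else:
--             ns, name = "general", tag_str
--         if (ns, name) not in seen:
--             seen.add((ns, name))
--             result.append((ns, name))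
--     return result
-- ===== SOURCE B (Python) =====
-- def parse_tag_strings(tags: list[str]) -> list[tuple[str, str]]:
--     """Parse 'namespace:name' strings into deduplicated (namespace, name) tuples.
--
--     Repeated-filter dedup: parse everything, then repeatedly take the first
--     tuple and filter every copy of it out of the remainder -- no seen set,
--     no dict, no membership test against an accumulator.
--     """
--     remaining = [tuple(t.split(":", 1)) if ":" in t else ("general", t) for t in tags]
--     result = []
--     while remaining:
--         head = remaining[0]
--         result.append(head)
--         remaining = [p for p in remaining[1:] if p != head]
--     return result
-- ===== Notes on version B (the rewrite author's own statement) =====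
-- stated objective: alternative
-- what changed: Replaced the single seen-set check-and-append loop by a parse pass followed by repeated-filter dedup: take the first parsed tuple, filter all its copies out of the remainder, repeat; no seen set or membership structure is kept.
import Mathlib
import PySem

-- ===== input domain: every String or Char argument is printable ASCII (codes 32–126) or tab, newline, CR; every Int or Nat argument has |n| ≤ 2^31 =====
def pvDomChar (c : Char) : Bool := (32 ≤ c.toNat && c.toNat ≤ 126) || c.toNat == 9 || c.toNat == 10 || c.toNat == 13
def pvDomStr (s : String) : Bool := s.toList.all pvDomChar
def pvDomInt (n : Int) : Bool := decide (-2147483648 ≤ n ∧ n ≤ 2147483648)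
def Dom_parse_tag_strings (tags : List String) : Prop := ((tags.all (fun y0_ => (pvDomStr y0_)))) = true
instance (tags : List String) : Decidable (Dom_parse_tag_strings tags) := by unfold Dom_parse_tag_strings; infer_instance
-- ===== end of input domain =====

-- B replaces A's seen-set check-and-append loop by a parse pass plus repeated-filter dedup (alternative; same dedup semantics).

-- ===== PORT A =====
-- per-element parsing: "ns:name".split(":",1) with 'general' default (appears in both Pythons)
def pvParseTag (tag_str : String) : String × String :=
  if PySem.Str.isIn ":" tag_str then
    match PySem.Str.splitMax? tag_str ":" 1 with
    | some (ns :: name :: _) => (ns, name)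
    | _ => ("general", tag_str)  -- unreachable: ':' ∈ tag_str gives exactly two pieces
  else ("general", tag_str)

def pvStepA (st : PySem.Set (String × String) × List (String × String)) (tag_str : String) :
    PySem.Set (String × String) × List (String × String) :=
  let p := pvParseTag tag_str
  if PySem.Set.contains st.1 p then st else (PySem.Set.add st.1 p, st.2 ++ [p])

def parse_tag_strings (tags : List String) : List (String × String) :=
  (tags.foldl pvStepA (PySem.Set.empty, [])).2

-- ===== PORT B =====
-- the while-loop of Source B: pop the head, filter its copies out of the remainder, repeat
def pvFDedup (l : List (String × String)) : List (String × String) :=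
  match l with
  | [] => []
  | head :: rest => head :: pvFDedup (rest.filter (fun p => p != head))
termination_by l.length
decreasing_by simpa using Nat.lt_succ_of_le ((List.length_filter_le _ _).trans (le_of_eq List.length_attach))

def parse_tag_strings_alt (tags : List String) : List (String × String) :=
  pvFDedup (tags.map pvParseTag)

-- ===== PRECONDITION & SPEC =====
def Spec_parse_tag_strings (tags : List String) (out : List (String × String)) : Prop := out = parse_tag_strings_alt tags
instance (tags : List String) (out : List (String × String)) : Decidable (Spec_parse_tag_strings tags out) := by unfold Spec_parse_tag_strings; infer_instance

-- ===== CLAIM (what is proved, stated in full; the proofs are below) =====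
def Claim_equal_parse_tag_strings : Prop := ∀ (tags : List String), Dom_parse_tag_strings tags → Spec_parse_tag_strings tags (parse_tag_strings tags)

-- ===== LEMMAS AND PROOFS =====

theorem pvFDedup_nil : pvFDedup [] = [] := by simp [pvFDedup.eq_def]

theorem pvFDedup_cons (h : String × String) (t : List (String × String)) :
    pvFDedup (h :: t) = h :: pvFDedup (t.filter (fun p => p != h)) := by rw [pvFDedup.eq_def]

-- A's loop keeps seen = result, so one step is Set.add on both components
theorem pvStepA_diag (s : PySem.Set (String × String)) (t : String) :
    pvStepA (s, s) t = (PySem.Set.add s (pvParseTag t), PySem.Set.add s (pvParseTag t)) := by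
  simp only [pvStepA, PySem.Set.add]
  split <;> simp_all

theorem pvFoldA_diag (l : List String) (s : PySem.Set (String × String)) :
    l.foldl pvStepA (s, s) = (l.foldl (fun a t => PySem.Set.add a (pvParseTag t)) s,
                              l.foldl (fun a t => PySem.Set.add a (pvParseTag t)) s) := by
  induction l generalizing s with
  | nil => rfl
  | cons t l ih => simp [List.foldl_cons, pvStepA_diag, ih]

-- the seen-set fold and the repeated-filter dedup build the same first-occurrence list
theorem pvFoldAdd_eq_fdedup (l : List (String × String)) :
    ∀ s : PySem.Set (String × String),
      l.foldl PySem.Set.add s = s ++ pvFDedup (l.filter (fun x => decide (x ∉ s))) := by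
  induction l with
  | nil => intro s; simp [pvFDedup_nil]
  | cons x l ih =>
    intro s
    by_cases hx : x ∈ s
    · have hadd : PySem.Set.add s x = s := by
        simp [PySem.Set.add, PySem.Set.contains, hx]
      simp [List.foldl_cons, hx, ih s]
    · have hadd : PySem.Set.add s x = s ++ [x] := by
        simp [PySem.Set.add, PySem.Set.contains, hx]
      rw [List.foldl_cons, hadd, ih (s ++ [x])]
      have hfil : l.filter (fun y => decide (y ∉ s ++ [x]))
          = (l.filter (fun y => decide (y ∉ s))).filter (fun p => p != x) := by
        simp only [List.filter_filter]
        apply List.filter_congr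
        intro y _
        by_cases h1 : y = x <;> by_cases h2 : y ∈ s <;> simp [h1, h2]
      rw [hfil]
      simp [pvFDedup_cons, hx, List.append_assoc]

theorem pvOfList_eq_fdedup (l : List (String × String)) :
    PySem.Set.ofList l = pvFDedup l := by
  rw [PySem.Set.ofList_eq_foldl, pvFoldAdd_eq_fdedup l []]
  simp

-- ===== VERDICT (by name: the statement is the Claim_ definition above) =====
theorem parse_tag_strings_spec : Claim_equal_parse_tag_strings := by
  intro tags _
  show parse_tag_strings tags = parse_tag_strings_alt tags
  have h : PySem.Set.empty (α := String × String) = ([] : List (String × String)) := rfl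
  rw [parse_tag_strings, parse_tag_strings_alt, h, pvFoldA_diag, ← pvOfList_eq_fdedup,
      PySem.Set.ofList_eq_foldl, List.foldl_map]
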